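-- pv_equiv track=rewrite | github.com/Thernn88/SAPPHYRE | FlexCullOrig.py | deinterleave
-- ===== SOURCE A (Python) =====
-- def deinterleave(fasta_lines: list) -> str:
--     result = []
--     this_out = list()
--     for line in fasta_lines:
--         if line[0] == '>':
--             if this_out:
--                 result.append(''.join(this_out))
--             result.append(line)
--             this_out = list()
--         else:
--             this_out.append(line.strip())
--     if this_out != list():
--         result.append(''.join(this_out))
--     return result
-- ===== SOURCE B (Python) =====
-- def deinterleave(fasta_lines: list) -> str:
--     # Run-consuming scan: each sequence run is consumed in one inner step,
--     # so no pending-buffer state ("this_out") survives between iterations.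
--     result = []
--     i = 0
--     n = len(fasta_lines)
--     while i < n:
--         line = fasta_lines[i]
--         if line[0] == '>':
--             result.append(line)
--             i += 1
--         else:
--             j = i + 1
--             while j < n and fasta_lines[j][0] != '>':
--                 j += 1
--             result.append(''.join(l.strip() for l in fasta_lines[i:j]))
--             i = j
--     return result
-- ===== Notes on version B (the rewrite author's own statement) =====
-- stated objective: alternative
-- what changed: Replaces A's stateful accumulate-and-flush loop (pending this_out buffer flushed at headers and at the end) with an index-based run-consuming scan that emits each header directly and consumes each maximal sequence run in one inner step, joining it immediately; no buffer state crosses iterations.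
import Mathlib
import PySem

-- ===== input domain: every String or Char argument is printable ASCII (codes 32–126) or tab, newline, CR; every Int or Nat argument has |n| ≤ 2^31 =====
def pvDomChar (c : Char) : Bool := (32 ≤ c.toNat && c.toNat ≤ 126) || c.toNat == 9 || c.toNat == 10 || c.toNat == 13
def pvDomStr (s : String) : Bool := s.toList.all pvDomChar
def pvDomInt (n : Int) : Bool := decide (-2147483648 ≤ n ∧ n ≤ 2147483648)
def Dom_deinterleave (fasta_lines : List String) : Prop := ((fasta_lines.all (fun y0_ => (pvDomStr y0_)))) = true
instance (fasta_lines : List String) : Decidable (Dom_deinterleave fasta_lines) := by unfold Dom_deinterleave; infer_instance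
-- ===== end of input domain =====

-- B replaces A's accumulate-and-flush buffer loop by an index-free run-consuming scan
-- (each maximal sequence run is joined in one step); same cost, different decomposition.

-- ===== PORT A =====
-- the loop body: state = (result, this_out); flush this_out at each header
def deinterleaveStep (st : List String × List String) (line : String) : List String × List String :=
  if PySem.Str.pyGet? line 0 == some '>' then
    ((if st.2 = [] then st.1 else st.1 ++ [PySem.Str.join "" st.2]) ++ [line], [])
  else
    (st.1, st.2 ++ [PySem.Str.strip line])

-- the for loop over fasta_lines, then the final flush of this_out
def deinterleave (fasta_lines : List String) : List String :=
  let st := fasta_lines.foldl deinterleaveStep ([], [])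
  if st.2 = [] then st.1 else st.1 ++ [PySem.Str.join "" st.2]

-- ===== PORT B =====
-- the outer while loop: a header is emitted and the scan advances by one;
-- otherwise the inner while (takeWhile/dropWhile over the rest) consumes the
-- whole sequence run, which is stripped and joined at once
def deinterleave_alt (fasta_lines : List String) : List String :=
  match fasta_lines with
  | [] => []
  | line :: rest =>
    if PySem.Str.pyGet? line 0 == some '>' then
      line :: deinterleave_alt rest
    else
      PySem.Str.join ""
          ((line :: rest.takeWhile (fun l => !(PySem.Str.pyGet? l 0 == some '>'))).map PySem.Str.strip)
        :: deinterleave_alt (rest.dropWhile (fun l => !(PySem.Str.pyGet? l 0 == some '>')))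
termination_by fasta_lines.length
decreasing_by
  · simp
  · exact Nat.lt_succ_of_le (List.length_dropWhile_le _ _)

-- ===== PRECONDITION & SPEC =====
-- Pre_ excludes inputs containing an empty line: there Python A raises IndexError at line[0]
def Pre_deinterleave (fasta_lines : List String) : Prop := ∀ l ∈ fasta_lines, l ≠ ""
instance (fasta_lines : List String) : Decidable (Pre_deinterleave fasta_lines) := by
  unfold Pre_deinterleave; infer_instance
def pvWitness_deinterleave : List String := [">seq1", "ACGT ", " TTAA", ">seq2", "GG"]
def Spec_deinterleave (fasta_lines : List String) (out : List String) : Prop := out = deinterleave_alt fasta_lines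
instance (fasta_lines : List String) (out : List String) : Decidable (Spec_deinterleave fasta_lines out) := by unfold Spec_deinterleave; infer_instance

-- ===== CLAIM (what is proved, stated in full; the proofs are below) =====
def Claim_equal_deinterleave : Prop := ∀ (fasta_lines : List String), Dom_deinterleave fasta_lines → Pre_deinterleave fasta_lines → Spec_deinterleave fasta_lines (deinterleave fasta_lines)

-- ===== LEMMAS AND PROOFS =====

-- abstract description of A's remaining work given the pending buffer acc
def pvF (acc : List String) : List String → List String
  | [] => if acc = [] then [] else [PySem.Str.join "" acc]
  | l :: ls =>
    if PySem.Str.pyGet? l 0 == some '>' then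
      (if acc = [] then [] else [PySem.Str.join "" acc]) ++ l :: pvF [] ls
    else pvF (acc ++ [PySem.Str.strip l]) ls

lemma deinterleave_foldl (lines res acc : List String) :
    (let st := lines.foldl deinterleaveStep (res, acc)
      if st.2 = [] then st.1 else st.1 ++ [PySem.Str.join "" st.2]) = res ++ pvF acc lines := by
  induction lines generalizing res acc with
  | nil => simp only [List.foldl_nil, pvF]; split <;> simp
  | cons l ls ih =>
    simp only [List.foldl_cons]
    by_cases h : PySem.List.pyGet? l.toList 0 = some '>'
    · rw [show deinterleaveStep (res, acc) l
          = ((if acc = [] then res else res ++ [PySem.Str.join "" acc]) ++ [l], []) by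
        simp [deinterleaveStep, h]]
      rw [ih]
      by_cases ha : acc = [] <;> simp [pvF, h, ha]
    · rw [show deinterleaveStep (res, acc) l = (res, acc ++ [PySem.Str.strip l]) by
        simp [deinterleaveStep, h]]
      rw [ih]
      simp [pvF, h]

lemma pvF_alt (lines : List String) :
    pvF [] lines = deinterleave_alt lines ∧
    ∀ acc, acc ≠ [] →
      pvF acc lines =
        PySem.Str.join ""
            (acc ++ (lines.takeWhile (fun l => !(PySem.Str.pyGet? l 0 == some '>'))).map PySem.Str.strip)
          :: deinterleave_alt (lines.dropWhile (fun l => !(PySem.Str.pyGet? l 0 == some '>'))) := by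
  induction lines with
  | nil =>
    refine ⟨by simp [pvF, deinterleave_alt], ?_⟩
    intro acc hacc
    simp [pvF, hacc, deinterleave_alt]
  | cons l ls ih =>
    by_cases h : PySem.List.pyGet? l.toList 0 = some '>'
    · constructor
      · simp [pvF, h, deinterleave_alt, ih.1]
      · intro acc hacc
        simp [pvF, h, hacc, deinterleave_alt, ih.1]
    · constructor
      · have h2 := ih.2 [PySem.Str.strip l] (by simp)
        simp only [pvF, deinterleave_alt]
        simp [h] at h2 ⊢
        rw [h2]
      · intro acc hacc
        have h2 := ih.2 (acc ++ [PySem.Str.strip l]) (by simp)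
        simp only [pvF]
        simp [h] at h2 ⊢
        rw [h2]

-- ===== VERDICT (by name: the statement is the Claim_ definition above) =====
theorem deinterleave_spec : Claim_equal_deinterleave := by
  intro lines _ _
  unfold Spec_deinterleave deinterleave
  rw [deinterleave_foldl lines [] []]
  simpa using (pvF_alt lines).1
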